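-- pv_equiv track=rewrite | github.com/dandumitriu33/CodeWarsPython | set3/throwingdarts.py | score_throws
-- ===== SOURCE A (Python) =====
-- def score_throws(radiuses):
--     if radiuses == []:
--         return 0
--     points = 0
--     bonus_100 = True
--     for i in radiuses:
--         if i > 10:
--             bonus_100 = False
--         elif 5 <= i <= 10:
--             points += 5
--             bonus_100 = False
--         elif i < 5:
--             points += 10
--     if bonus_100:
--         points += 100
--     return points
-- ===== SOURCE B (Python) =====
-- def score_throws(radiuses):
--     if radiuses == []:
--         return 0
--     low = len([i for i in radiuses if i < 5])
--     mid = len([i for i in radiuses if 5 <= i <= 10])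
--     points = 10 * low + 5 * mid
--     if max(radiuses) < 5:
--         points += 100
--     return points
-- ===== Notes on version B (the rewrite author's own statement) =====
-- stated objective: alternative
-- what changed: Replaces A's flag-threading accumulator loop (per-dart score plus a bonus flag) with band counting: filter-count the two radius bands, compute the score arithmetically as 10*low+5*mid, and decide the bonus by comparing max(radiuses) with 5 instead of threading a flag.
import Mathlib
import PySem

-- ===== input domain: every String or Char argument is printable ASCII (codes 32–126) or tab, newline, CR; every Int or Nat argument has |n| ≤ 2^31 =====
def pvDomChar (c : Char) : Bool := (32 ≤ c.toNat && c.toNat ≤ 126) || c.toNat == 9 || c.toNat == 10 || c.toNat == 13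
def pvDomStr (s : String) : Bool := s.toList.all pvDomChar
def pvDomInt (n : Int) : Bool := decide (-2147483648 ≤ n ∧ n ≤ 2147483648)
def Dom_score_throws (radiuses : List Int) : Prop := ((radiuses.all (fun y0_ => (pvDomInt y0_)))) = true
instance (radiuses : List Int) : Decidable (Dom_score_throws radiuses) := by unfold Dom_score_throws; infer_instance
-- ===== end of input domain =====

-- B replaces A's flag-threading accumulator loop by band counting: count the two radius
-- bands, score arithmetically as 10*low + 5*mid, and decide the bonus from max(radiuses) < 5.
-- ===== PORT A =====
-- A: one pass threading (points, bonus_100)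
def score_throws (radiuses : List Int) : Int :=
  if radiuses = [] then 0
  else
    let st := radiuses.foldl (fun (st : Int × Bool) i =>
      if i > 10 then (st.1, false)
      else if 5 ≤ i ∧ i ≤ 10 then (st.1 + 5, false)
      else if i < 5 then (st.1 + 10, st.2)
      else st) (0, true)
    if st.2 then st.1 + 100 else st.1

-- ===== PORT B =====
-- B: count the two bands, score arithmetically, bonus from the maximum
def score_throws_alt (radiuses : List Int) : Int :=
  if radiuses = [] then 0
  else
    let low : Int := ((radiuses.filter (fun i => i < 5)).length : Int)
    let mid : Int := ((radiuses.filter (fun i => 5 ≤ i ∧ i ≤ 10)).length : Int)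
    let points := 10 * low + 5 * mid
    match PySem.List.max? radiuses (fun x => x) with
    | some m => if m < 5 then points + 100 else points
    | none => points

-- ===== PRECONDITION & SPEC =====
def Spec_score_throws (radiuses : List Int) (out : Int) : Prop := out = score_throws_alt radiuses
instance (radiuses : List Int) (out : Int) : Decidable (Spec_score_throws radiuses out) := by unfold Spec_score_throws; infer_instance

-- ===== CLAIM (what is proved, stated in full; the proofs are below) =====
def Claim_equal_score_throws : Prop := ∀ (radiuses : List Int), Dom_score_throws radiuses → Spec_score_throws radiuses (score_throws radiuses)

-- ===== LEMMAS AND PROOFS =====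
lemma score_throws_fold (radiuses : List Int) (p : Int) (b : Bool) :
    radiuses.foldl (fun (st : Int × Bool) i =>
      if i > 10 then (st.1, false)
      else if 5 ≤ i ∧ i ≤ 10 then (st.1 + 5, false)
      else if i < 5 then (st.1 + 10, st.2)
      else st) (p, b)
    = (p + 10 * ((radiuses.filter (fun i => i < 5)).length : Int)
         + 5 * ((radiuses.filter (fun i => 5 ≤ i ∧ i ≤ 10)).length : Int),
       b && radiuses.all (fun i => i < 5)) := by
  induction radiuses generalizing p b with
  | nil => simp
  | cons x xs ih =>
    simp only [List.foldl_cons, List.filter_cons, List.all_cons]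
    by_cases h1 : x > 10
    · rw [if_pos h1, ih]
      have hx : ¬ x < 5 := by omega
      have hy : ¬ (5 ≤ x ∧ x ≤ 10) := by omega
      simp [hx, hy]
    · rw [if_neg h1]
      by_cases h2 : 5 ≤ x ∧ x ≤ 10
      · rw [if_pos h2, ih]
        have hx : ¬ x < 5 := by omega
        simp [hx, h2]
        ring
      · have hx : x < 5 := by omega
        have hy : ¬ (5 ≤ x ∧ x ≤ 10) := h2
        rw [if_neg h2, if_pos hx, ih]
        simp [hx, hy]
        ring

lemma max_lt_iff_all (x : Int) (xs : List Int) :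
    (xs.foldl max x < 5) ↔ ((x :: xs).all (fun i => decide (i < 5)) = true) := by
  constructor
  · intro h
    have hle := PySem.List.le_foldl_max xs x
    simp only [List.all_cons, List.all_eq_true, Bool.and_eq_true, decide_eq_true_eq]
    exact ⟨by omega, fun y hy => by have := hle.2 y hy; omega⟩
  · intro h
    simp only [List.all_cons, List.all_eq_true, Bool.and_eq_true, decide_eq_true_eq] at h
    rcases PySem.List.foldl_max_mem xs x with hm | hm
    · rw [hm]; exact h.1
    · exact h.2 _ hm

-- ===== VERDICT (by name: the statement is the Claim_ definition above) =====
theorem score_throws_spec : Claim_equal_score_throws := by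
  intro radiuses _
  unfold Spec_score_throws score_throws score_throws_alt
  rcases radiuses with _ | ⟨x, xs⟩
  · simp
  · simp only [if_neg (List.cons_ne_nil x xs), score_throws_fold, Bool.true_and,
      PySem.List.max?_id_cons]
    rcases (max_lt_iff_all x xs) with ⟨h1, h2⟩
    by_cases h : xs.foldl max x < 5
    · simp [if_pos h, h1 h]
    · have : ¬ ((x :: xs).all (fun i => decide (i < 5)) = true) := fun hc => h (h2 hc)
      simp only [if_neg h]
      simp [this]
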